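-- pv_equiv track=rewrite | github.com/Kimtaehan2/Baekjoon | 백준/Gold/5577. RBY팡！/RBY팡！.py | RBYboom
-- ===== SOURCE A (Python) =====
-- def RBYboom(RBY): # 4개 이상 합쳐진 공을 삭제하여 남은 공의 개수를 반환하는 함수
--     stack = []
--     while RBY:
--         if len(stack)>0 and stack[-1][0]==RBY[-1]:
--             stack.append([RBY.pop(),stack[-1][1]+1])
--         else:
--             if len(stack)>0 and stack[-1][1]>=4:
--                 del stack[-stack[-1][1]:]
--             else:
--                 stack.append([RBY.pop(),1])
--     if len(stack)>0 and stack[-1][1]>=4: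
--         del stack[-stack[-1][1]:]
--     return len(stack)
-- ===== SOURCE B (Python) =====
-- def RBYboom(RBY):
--     # Staged: (1) run-length encode RBY back-to-front (the order A consumes it),
--     # (2) collapse the run list, one whole run per step with at most one pop,
--     # (3) trim a trailing >=4 run and sum the remaining run lengths.
--     # Unlike A, B does not mutate RBY (A drains it); the return value is the same.
--     groups = []
--     for b in reversed(RBY):
--         if groups and groups[-1][0] == b:
--             groups[-1][1] += 1
--         else:
--             groups.append([b, 1])
--     stack = []
--     for x, c in groups:
--         if stack and stack[-1][1] >= 4:
--             stack.pop()
--         if stack and stack[-1][0] == x: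
--             stack[-1][1] += c
--         else:
--             stack.append([x, c])
--     if stack and stack[-1][1] >= 4:
--         stack.pop()
--     return sum(c for _, c in stack)
-- ===== Notes on version B (the rewrite author's own statement) =====
-- stated objective: alternative
-- what changed: B is staged: one pass run-length encodes the input back-to-front into (ball,count) runs, then a second pass folds over whole runs (at most one pop then merge-or-push per run, no retry branch) and sums the surviving run lengths, instead of A's single per-ball loop with a non-consuming delete branch, one stack entry per ball, negative-slice block deletion and len().
import Mathlib
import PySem

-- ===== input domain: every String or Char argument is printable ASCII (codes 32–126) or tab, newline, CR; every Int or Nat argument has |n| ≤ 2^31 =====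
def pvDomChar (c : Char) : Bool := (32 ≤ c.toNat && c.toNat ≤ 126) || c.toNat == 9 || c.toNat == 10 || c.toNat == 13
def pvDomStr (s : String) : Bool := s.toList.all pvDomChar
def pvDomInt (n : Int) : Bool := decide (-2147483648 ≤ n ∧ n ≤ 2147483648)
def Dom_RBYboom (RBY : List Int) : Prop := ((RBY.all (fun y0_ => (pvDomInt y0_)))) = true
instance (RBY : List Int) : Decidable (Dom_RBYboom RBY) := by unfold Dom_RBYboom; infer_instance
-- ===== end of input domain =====

-- B replaces A's single per-ball loop (one stack entry per ball, a non-consuming delete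
-- branch, negative-slice block deletion, len) by two staged passes: run-length encode the
-- input back-to-front, then collapse the run list one whole run per step (at most one pop
-- per step, no retry), trim a trailing >=4 run and sum the run lengths.
-- Like the Python A, A drains its argument in place; B does not; the equivalence proved is about the return value.


-- ===== PORT A =====
-- A pops RBY from the end; we recurse over RBY.reverse, the stack is head-first
-- (Python stack[-1] = Lean head, 'del stack[-c:]' = List.drop c).
def RBYloopA : List Int → List (Int × Nat) → List (Int × Nat)
  | [], st => st
  | b :: rest, st =>
    match st with
    | (s, c) :: tl =>
      if s = b then RBYloopA rest ((b, c + 1) :: (s, c) :: tl)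
      else if 4 ≤ c then RBYloopA (b :: rest) (((s, c) :: tl).drop c)
      else RBYloopA rest ((b, 1) :: (s, c) :: tl)
    | [] => RBYloopA rest [(b, 1)]
termination_by rev st => 2 * rev.length + st.length
decreasing_by all_goals (simp; try omega)

def RBYboom (RBY : List Int) : Int :=
  let st := RBYloopA RBY.reverse []
  let st' := match st with
    | (s, c) :: tl => if 4 ≤ c then ((s, c) :: tl).drop c else (s, c) :: tl
    | [] => ([] : List (Int × Nat))
  (st'.length : Int)

-- ===== PORT B =====
-- stage 1: run-length encode the reversed input (Python groups list, appended at the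
-- end and read in order; here built head-first and reversed when done).
def RBYrle : List Int → List (Int × Nat) → List (Int × Nat)
  | [], acc => acc.reverse
  | b :: rest, [] => RBYrle rest [(b, 1)]
  | b :: rest, (s, c) :: tl =>
    if s = b then RBYrle rest ((s, c + 1) :: tl)
    else RBYrle rest ((b, 1) :: (s, c) :: tl)

-- stage 2 body: at most one pop, then merge or push — one whole run per step.
def RBYstep2 (st : List (Int × Nat)) (g : Int × Nat) : List (Int × Nat) :=
  let st1 := match st with
    | (s, k) :: tl => if 4 ≤ k then tl else (s, k) :: tl
    | [] => ([] : List (Int × Nat))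
  match st1 with
  | (s, k) :: tl => if s = g.1 then (s, k + g.2) :: tl else g :: (s, k) :: tl
  | [] => [g]

def RBYboom_alt (RBY : List Int) : Int :=
  let groups := RBYrle RBY.reverse []
  let st := groups.foldl RBYstep2 []
  let st' := match st with
    | (s, k) :: tl => if 4 ≤ k then tl else (s, k) :: tl
    | [] => ([] : List (Int × Nat))
  ((st'.map Prod.snd).sum : Nat)

-- ===== PRECONDITION & SPEC =====
def Spec_RBYboom (RBY : List Int) (out : Int) : Prop := out = RBYboom_alt RBY
instance (RBY : List Int) (out : Int) : Decidable (Spec_RBYboom RBY out) := by unfold Spec_RBYboom; infer_instance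

-- ===== CLAIM (what is proved, stated in full; the proofs are below) =====
def Claim_equal_RBYboom : Prop := ∀ (RBY : List Int), Dom_RBYboom RBY → Spec_RBYboom RBY (RBYboom RBY)

-- ===== LEMMAS AND PROOFS =====

-- proof-side compressed stack: per-ball loop over the reversed input with run-length groups
def RBYloopB : List Int → List (Int × Nat) → List (Int × Nat)
  | [], st => st
  | b :: rest, st =>
    match st with
    | (s, c) :: tl =>
      if s = b then RBYloopB rest ((s, c + 1) :: tl)
      else if 4 ≤ c then RBYloopB (b :: rest) tl
      else RBYloopB rest ((b, 1) :: (s, c) :: tl)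
    | [] => RBYloopB rest [(b, 1)]
termination_by rev st => 2 * rev.length + st.length
decreasing_by all_goals (simp; try omega)

-- one compressed group (s, c) expands to A's c individual entries (s, c), (s, c-1), …, (s, 1)
def RBYgroup (s : Int) (c : Nat) : List (Int × Nat) :=
  (List.range c).map (fun i => (s, c - i))

def RBYexpand : List (Int × Nat) → List (Int × Nat)
  | [] => []
  | (s, c) :: tl => RBYgroup s c ++ RBYexpand tl

theorem RBYgroup_succ (s : Int) (c : Nat) :
    RBYgroup s (c + 1) = (s, c + 1) :: RBYgroup s c := by
  simp [RBYgroup, List.range_succ_eq_map, List.map_map, Function.comp]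

theorem RBYgroup_pos (s : Int) (c : Nat) (hc : 1 ≤ c) :
    RBYgroup s c = (s, c) :: RBYgroup s (c - 1) := by
  obtain ⟨c', rfl⟩ : ∃ c', c = c' + 1 := ⟨c - 1, by omega⟩
  simp [RBYgroup_succ]

theorem RBYgroup_length (s : Int) (c : Nat) : (RBYgroup s c).length = c := by
  simp [RBYgroup]

theorem RBYexpand_length (gs : List (Int × Nat)) :
    (RBYexpand gs).length = (gs.map Prod.snd).sum := by
  induction gs with
  | nil => rfl
  | cons g tl ih => cases g with
    | mk s c => simp [RBYexpand, RBYgroup_length, ih]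

theorem RBYexpand_drop (s : Int) (c : Nat) (tl : List (Int × Nat)) :
    (RBYexpand ((s, c) :: tl)).drop c = RBYexpand tl := by
  simp [RBYexpand, RBYgroup_length]

-- the expanded stack of a positive-count group list starts with (s, c)
theorem RBYexpand_cons_pos (s : Int) (c : Nat) (tl : List (Int × Nat)) (hc : 1 ≤ c) :
    RBYexpand ((s, c) :: tl) = (s, c) :: (RBYgroup s (c - 1) ++ RBYexpand tl) := by
  show RBYgroup s c ++ RBYexpand tl = _
  rw [RBYgroup_pos s c hc]
  rfl

theorem RBYexpand_one (b : Int) (st : List (Int × Nat)) :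
    RBYexpand ((b, 1) :: st) = (b, 1) :: RBYexpand st := by
  rw [RBYexpand_cons_pos b 1 st le_rfl]
  rfl

-- B's loop only ever builds groups with positive run length
theorem RBYloopB_pos (rev : List Int) (gs : List (Int × Nat)) :
    (∀ p ∈ gs, 1 ≤ p.2) → ∀ p ∈ RBYloopB rev gs, 1 ≤ p.2 := by
  induction rev, gs using RBYloopB.induct with
  | case1 st => intro h; rw [RBYloopB]; exact h
  | case2 rest s c tl ih =>
    intro h
    rw [RBYloopB, if_pos rfl]
    refine ih ?_
    intro p hp
    rcases List.mem_cons.1 hp with h1 | hp'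
    · subst h1; simp
    · exact h p (List.mem_cons_of_mem _ hp')
  | case3 b rest s c tl hsb hc ih =>
    intro h
    rw [RBYloopB, if_neg hsb, if_pos hc]
    exact ih fun p hp => h p (List.mem_cons_of_mem _ hp)
  | case4 b rest s c tl hsb hc ih =>
    intro h
    rw [RBYloopB, if_neg hsb, if_neg hc]
    refine ih ?_
    intro p hp
    rcases List.mem_cons.1 hp with h1 | hp'
    · subst h1; simp
    · exact h p hp'
  | case5 b rest ih =>
    intro _
    rw [RBYloopB]
    refine ih ?_
    intro p hp
    rcases List.mem_cons.1 hp with h1 | hp'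
    · subst h1; simp
    · simp at hp'

-- main simulation: A's per-ball stack is the expansion of B's compressed stack
theorem RBYloop_sim (rev : List Int) (gs : List (Int × Nat)) :
    (∀ p ∈ gs, 1 ≤ p.2) →
    RBYloopA rev (RBYexpand gs) = RBYexpand (RBYloopB rev gs) := by
  induction rev, gs using RBYloopB.induct with
  | case1 st => intro _; rw [RBYloopA, RBYloopB]
  | case2 rest s c tl ih =>
    intro h
    have hc : 1 ≤ c := h (s, c) (List.mem_cons_self ..)
    rw [RBYloopB, if_pos rfl]
    rw [RBYexpand_cons_pos s c tl hc, RBYloopA, if_pos rfl]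
    have e : (s, c + 1) :: (s, c) :: (RBYgroup s (c - 1) ++ RBYexpand tl)
        = RBYexpand ((s, c + 1) :: tl) := by
      rw [RBYexpand_cons_pos s (c + 1) tl (by omega), Nat.add_sub_cancel,
        RBYgroup_pos s c hc]
      rfl
    rw [e]
    refine ih ?_
    intro p hp
    rcases List.mem_cons.1 hp with h1 | hp'
    · subst h1; simp
    · exact h p (List.mem_cons_of_mem _ hp')
  | case3 b rest s c tl hsb hc ih =>
    intro h
    have hc1 : 1 ≤ c := by omega
    rw [RBYloopB, if_neg hsb, if_pos hc]
    rw [RBYexpand_cons_pos s c tl hc1, RBYloopA, if_neg hsb, if_pos hc]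
    rw [← RBYexpand_cons_pos s c tl hc1, RBYexpand_drop]
    exact ih fun p hp => h p (List.mem_cons_of_mem _ hp)
  | case4 b rest s c tl hsb hc ih =>
    intro h
    have hc1 : 1 ≤ c := h (s, c) (List.mem_cons_self ..)
    rw [RBYloopB, if_neg hsb, if_neg hc]
    rw [RBYexpand_cons_pos s c tl hc1, RBYloopA, if_neg hsb, if_neg hc]
    rw [← RBYexpand_cons_pos s c tl hc1, ← RBYexpand_one]
    refine ih ?_
    intro p hp
    rcases List.mem_cons.1 hp with h1 | hp'
    · subst h1; simp
    · exact h p hp'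
  | case5 b rest ih =>
    intro _
    rw [RBYloopB]
    have h0 : RBYexpand [] = ([] : List (Int × Nat)) := rfl
    rw [h0, RBYloopA]
    have e : [((b : Int), (1 : Nat))] = RBYexpand [(b, 1)] := by
      rw [RBYexpand_one]; rfl
    rw [e]
    refine ih ?_
    intro p hp
    rcases List.mem_cons.1 hp with h1 | hp'
    · subst h1; simp
    · simp at hp'

-- ===== bridging RBYloopB with B's staged RLE + group fold =====

-- RLE never inspects below the top accumulator entry: the rest of the accumulator
-- just passes through to the front of the (reversed) output
theorem RBYrle_split (rest : List Int) : ∀ (g : Int × Nat) (top acc : List (Int × Nat)),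
    RBYrle rest (g :: top ++ acc) = acc.reverse ++ RBYrle rest (g :: top) := by
  induction rest with
  | nil => intro g top acc; simp [RBYrle]
  | cons b r ih =>
    intro g top acc
    cases g with
    | mk s c =>
      by_cases h : s = b
      · rw [show ((s, c) :: top ++ acc) = ((s, c) :: (top ++ acc)) from rfl,
          RBYrle, if_pos h, RBYrle, if_pos h]
        exact ih (s, c + 1) top acc
      · rw [show ((s, c) :: top ++ acc) = ((s, c) :: (top ++ acc)) from rfl,
          RBYrle, if_neg h, RBYrle, if_neg h]
        exact ih (b, 1) ((s, c) :: top) acc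

-- feeding a run of x's into an accumulator topped by an x-group just bumps the count
theorem RBYrle_run (x : Int) (k : Nat) : ∀ (m : Nat) (tl : List (Int × Nat)) (rest : List Int),
    RBYrle (List.replicate k x ++ rest) ((x, m) :: tl) = RBYrle rest ((x, m + k) :: tl) := by
  induction k with
  | zero => intro m tl rest; simp
  | succ k ih =>
    intro m tl rest
    rw [List.replicate_succ, List.cons_append, RBYrle, if_pos rfl, ih,
      show m + 1 + k = m + (k + 1) from by omega]

theorem RBYrle_head (rest : List Int) (x : Int) (c : Nat)
    (h : ∀ b, rest.head? = some b → b ≠ x) :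
    RBYrle rest [(x, c)] = (x, c) :: RBYrle rest [] := by
  cases rest with
  | nil => rfl
  | cons b r =>
    have hb : b ≠ x := h b rfl
    conv_lhs => rw [RBYrle]
    rw [if_neg (Ne.symm hb)]
    rw [show ((b, 1) :: [((x : Int), c)]) = ((b, 1) :: ([] : List (Int × Nat)) ++ [(x, c)]) from rfl,
      RBYrle_split]
    rfl

-- feeding a run of x's into the compressed per-ball loop when the top group is an x-group
theorem RBYloopB_run (x : Int) (k : Nat) : ∀ (m : Nat) (tl : List (Int × Nat)) (rest : List Int),
    RBYloopB (List.replicate k x ++ rest) ((x, m) :: tl) = RBYloopB rest ((x, m + k) :: tl) := by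
  induction k with
  | zero => intro m tl rest; simp
  | succ k ih =>
    intro m tl rest
    rw [List.replicate_succ, List.cons_append, RBYloopB, if_pos rfl, ih,
      show m + 1 + k = m + (k + 1) from by omega]

-- feeding a run of x's when the top (if any) is a different letter with count < 4: push then merge
theorem RBYloopB_push (x : Int) (c : Nat) (hc : 1 ≤ c) (rest : List Int)
    (st : List (Int × Nat))
    (h : st = [] ∨ ∃ s k tl, st = (s, k) :: tl ∧ s ≠ x ∧ k < 4) :
    RBYloopB (List.replicate c x ++ rest) st = RBYloopB rest ((x, c) :: st) := by
  obtain ⟨c', rfl⟩ : ∃ c', c = c' + 1 := ⟨c - 1, by omega⟩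
  rw [List.replicate_succ, List.cons_append]
  rcases h with rfl | ⟨s, k, tl, rfl, hs, hk⟩
  · rw [RBYloopB, RBYloopB_run, show 1 + c' = c' + 1 from by omega]
  · rw [RBYloopB, if_neg hs, if_neg (by omega), RBYloopB_run,
      show 1 + c' = c' + 1 from by omega]

-- one whole run fed to the per-ball compressed loop = one RBYstep2 step,
-- provided every non-top count is < 4 and the top letter (if any) differs from x
theorem RBYloopB_step (x : Int) (c : Nat) (hc : 1 ≤ c) (rest : List Int)
    (st : List (Int × Nat))
    (hinv : ∀ p ∈ st.tail, p.2 < 4)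
    (hhead : ∀ s k tl, st = (s, k) :: tl → s ≠ x) :
    RBYloopB (List.replicate c x ++ rest) st = RBYloopB rest (RBYstep2 st (x, c)) := by
  match st with
  | [] =>
    rw [RBYloopB_push x c hc rest [] (Or.inl rfl)]
    rfl
  | (s, m) :: tl =>
    have hs : s ≠ x := hhead s m tl rfl
    by_cases hm : 4 ≤ m
    · -- pop the exposed ≥4 group first
      obtain ⟨c', rfl⟩ : ∃ c', c = c' + 1 := ⟨c - 1, by omega⟩
      rw [List.replicate_succ, List.cons_append, RBYloopB, if_neg hs, if_pos hm,
        ← List.cons_append, ← List.replicate_succ]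
      match tl with
      | [] =>
        rw [RBYloopB_push x (c' + 1) (by omega) rest [] (Or.inl rfl)]
        simp [RBYstep2, hm]
      | (s', m') :: tl' =>
        have hm' : m' < 4 := hinv (s', m') (by simp)
        by_cases hs' : s' = x
        · rw [hs']
          rw [RBYloopB_run x (c' + 1) m' tl' rest]
          simp [RBYstep2, hm]
        · rw [RBYloopB_push x (c' + 1) (by omega) rest ((s', m') :: tl')
            (Or.inr ⟨s', m', tl', rfl, hs', hm'⟩)]
          simp [RBYstep2, hm, hs']
    · rw [RBYloopB_push x c hc rest ((s, m) :: tl)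
        (Or.inr ⟨s, m, tl, rfl, hs, by omega⟩)]
      simp [RBYstep2, hm, hs]

-- RBYstep2 keeps the invariant: the new top carries letter x, everything below is < 4
theorem RBYstep2_inv (x : Int) (c : Nat) (st : List (Int × Nat))
    (hinv : ∀ p ∈ st.tail, p.2 < 4)
    (hhead : ∀ s k tl, st = (s, k) :: tl → s ≠ x) :
    ∃ k' tl', RBYstep2 st (x, c) = (x, k') :: tl' ∧ ∀ p ∈ tl', p.2 < 4 := by
  match st with
  | [] => exact ⟨c, [], rfl, by simp⟩
  | (s, m) :: tl =>
    have hs : s ≠ x := hhead s m tl rfl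
    by_cases hm : 4 ≤ m
    · match tl with
      | [] => exact ⟨c, [], by simp [RBYstep2, hm], by simp⟩
      | (s', m') :: tl' =>
        have hm' : m' < 4 := hinv (s', m') (by simp)
        by_cases hs' : s' = x
        · subst hs'
          exact ⟨m' + c, tl', by simp [RBYstep2, hm],
            fun p hp => hinv p (List.mem_cons_of_mem _ hp)⟩
        · exact ⟨c, (s', m') :: tl', by simp [RBYstep2, hm, hs'],
            fun p hp => hinv p hp⟩
    · exact ⟨c, (s, m) :: tl, by simp [RBYstep2, hm, hs],
        by intro p hp
           rcases List.mem_cons.1 hp with h1 | hp'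
           · subst h1; omega
           · exact hinv p hp'⟩

-- heads of dropWhile fail the predicate
theorem RBYdropWhile_head (p : Int → Bool) (r : List Int) :
    ∀ b, (r.dropWhile p).head? = some b → p b = false := by
  induction r with
  | nil => intro b h; simp [List.dropWhile] at h
  | cons a r ih =>
    intro b h
    rw [List.dropWhile_cons] at h
    by_cases hp : p a
    · rw [if_pos hp] at h; exact ih b h
    · rw [if_neg hp] at h
      obtain rfl : a = b := by simpa using h
      exact Bool.of_not_eq_true hp

-- main bridge: the per-ball compressed loop equals B's fold over the RLE groups
theorem RBYloopB_eq_fold : ∀ (n : Nat) (l : List Int) (st : List (Int × Nat)),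
    l.length ≤ n →
    (∀ p ∈ st.tail, p.2 < 4) →
    (∀ s k tl b rl, st = (s, k) :: tl → l = b :: rl → s ≠ b) →
    RBYloopB l st = (RBYrle l []).foldl RBYstep2 st := by
  intro n
  induction n with
  | zero =>
    intro l st hlen _ _
    have : l = [] := List.eq_nil_of_length_eq_zero (by omega)
    subst this
    rw [RBYloopB]; rfl
  | succ n ih =>
    intro l st hlen hinv hhead
    match l with
    | [] => rw [RBYloopB]; rfl
    | x :: r =>
      have ht : r.takeWhile (fun y => decide (y = x))
          = List.replicate (r.takeWhile (fun y => decide (y = x))).length x := by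
        apply List.eq_replicate_of_mem
        intro b hb
        have := List.mem_takeWhile_imp hb
        simpa using this
      have hr : x :: r = List.replicate ((r.takeWhile (fun y => decide (y = x))).length + 1) x
          ++ r.dropWhile (fun y => decide (y = x)) := by
        rw [List.replicate_succ, List.cons_append]
        congr 1
        conv_lhs => rw [← List.takeWhile_append_dropWhile (p := fun y => decide (y = x)) (l := r)]
        rw [← ht]
      have hd : ∀ b, (r.dropWhile (fun y => decide (y = x))).head? = some b → b ≠ x := by
        intro b hb
        have := RBYdropWhile_head _ r b hb
        simpa using this
      have hs : ∀ s k tl, st = (s, k) :: tl → s ≠ x :=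
        fun s k tl hst => hhead s k tl x r hst rfl
      have hstep := RBYloopB_step x ((r.takeWhile (fun y => decide (y = x))).length + 1)
        (by omega) (r.dropWhile (fun y => decide (y = x))) st hinv hs
      have hrle : RBYrle (x :: r) []
          = (x, (r.takeWhile (fun y => decide (y = x))).length + 1)
            :: RBYrle (r.dropWhile (fun y => decide (y = x))) [] := by
        rw [RBYrle]
        conv_lhs => rw [show r = r.takeWhile (fun y => decide (y = x))
          ++ r.dropWhile (fun y => decide (y = x)) from (List.takeWhile_append_dropWhile).symm]
        rw [ht, RBYrle_run, RBYrle_head _ _ _ hd]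
        simp [Nat.add_comm]
      obtain ⟨k', tl', hst2, hinv'⟩ := RBYstep2_inv x
        ((r.takeWhile (fun y => decide (y = x))).length + 1) st hinv hs
      have hdlen : (r.dropWhile (fun y => decide (y = x))).length ≤ n := by
        have h1 := List.length_dropWhile_le (p := fun y => decide (y = x)) (l := r)
        simp at hlen
        omega
      calc RBYloopB (x :: r) st
          = RBYloopB (r.dropWhile (fun y => decide (y = x)))
              (RBYstep2 st (x, (r.takeWhile (fun y => decide (y = x))).length + 1)) := by
            conv_lhs => rw [hr]
            exact hstep
        _ = (RBYrle (r.dropWhile (fun y => decide (y = x))) []).foldl RBYstep2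
              (RBYstep2 st (x, (r.takeWhile (fun y => decide (y = x))).length + 1)) := by
            apply ih _ _ hdlen
            · rw [hst2]; exact fun p hp => hinv' p hp
            · intro s k tl b rl h1 h2
              rw [hst2] at h1
              have hbx := hd b (by rw [h2]; rfl)
              cases h1
              exact fun he => hbx he.symm
        _ = (RBYrle (x :: r) []).foldl RBYstep2 st := by
            rw [hrle, List.foldl_cons]

-- ===== VERDICT (by name: the statement is the Claim_ definition above) =====
theorem RBYboom_spec : Claim_equal_RBYboom := by
  intro RBY _
  show RBYboom RBY = RBYboom_alt RBY
  unfold RBYboom RBYboom_alt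
  have hpos := RBYloopB_pos RBY.reverse [] (by intro p hp; simp at hp)
  have hsim := RBYloop_sim RBY.reverse [] (by intro p hp; simp at hp)
  have hfold := RBYloopB_eq_fold RBY.reverse.length RBY.reverse [] le_rfl
    (by intro p hp; simp at hp)
    (by intro s k tl b rl h _; simp at h)
  have h0 : RBYexpand [] = [] := rfl
  rw [h0] at hsim
  simp only [← hfold]
  simp only [hsim]
  cases hgs : RBYloopB RBY.reverse [] with
  | nil => rfl
  | cons g tl =>
    cases g with
    | mk s c =>
      have hc : 1 ≤ c := by
        have := hpos (s, c); rw [hgs] at this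
        exact this (List.mem_cons_self ..)
      rw [RBYexpand_cons_pos s c tl hc]
      by_cases h4 : 4 ≤ c
      · simp only [if_pos h4]
        rw [← RBYexpand_cons_pos s c tl hc, RBYexpand_drop, RBYexpand_length]
      · simp only [if_neg h4]
        rw [← RBYexpand_cons_pos s c tl hc, RBYexpand_length]
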